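-- pv_equiv track=rewrite | github.com/hyunjincho84/contextual_skills_substitutes | sparse_auto_encoder/industry/vis_union_mean_activation_heatmap_threshold.py | iterative_common_removed_topk
-- ===== SOURCE A (Python) =====
-- def iterative_common_removed_topk(ranked_lists, topk, max_rounds=10000):
--     inds = list(ranked_lists.keys())
--     selected = {ind: list(ranked_lists[ind][:topk]) for ind in inds}
--     removed_all = set()
--     rounds = 0
--
--     while rounds < max_rounds:
--         rounds += 1
--         common = set.intersection(*[set(selected[i]) for i in inds])
--         if not common:
--             break
--         removed_all |= common
--         for ind in inds:
--             new_sel = []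
--             for fid in ranked_lists[ind]:
--                 if fid in removed_all or fid in new_sel:
--                     continue
--                 new_sel.append(int(fid))
--                 if len(new_sel) >= topk:
--                     break
--             selected[ind] = new_sel
--     return selected, removed_all, rounds
-- ===== SOURCE B (Python) =====
-- def iterative_common_removed_topk(ranked_lists, topk, max_rounds=10000):
--     inds = list(ranked_lists.keys())
--     selected = {ind: list(ranked_lists[ind][:topk]) for ind in inds}
--     removed_all = set()
--     rounds = 0
--     if rounds >= max_rounds:
--         return selected, removed_all, rounds
--     # round 1 on the raw top-k slices
--     rounds = 1
--     common = set.intersection(*[set(selected[ind]) for ind in inds])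
--     if not common:
--         return selected, removed_all, rounds
--     removed_all |= common
--     # one scan per list: distinct, not-yet-removed features in order; split into
--     # the current selection and an iterator over the remaining candidates
--     state = {}
--     for ind in inds:
--         seen, avail = set(), []
--         for fid in ranked_lists[ind]:
--             f = int(fid)
--             if f in seen:
--                 continue
--             seen.add(f)
--             if f not in removed_all:
--                 avail.append(f)
--         state[ind] = (avail[:topk], iter(avail[topk:]))
--     # incremental rounds: drop the newly common features, refill from the iterator
--     while rounds < max_rounds:
--         rounds += 1
--         common = set.intersection(*[set(state[ind][0]) for ind in inds])
--         if not common: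
--             break
--         removed_all |= common
--         for ind in inds:
--             sel, it = state[ind]
--             sel = [f for f in sel if f not in common]
--             while len(sel) < topk:
--                 f = next(it, None)
--                 if f is None:
--                     break
--                 if f not in removed_all:
--                     sel.append(f)
--             state[ind] = (sel, it)
--     selected = {ind: sel for ind, (sel, _it) in state.items()}
--     return selected, removed_all, rounds
-- ===== Notes on version B (the rewrite author's own statement) =====
-- stated objective: alternative
-- what changed: Instead of rescanning every full ranked list in every round (with an O(k) 'fid in new_sel' dedup test inside), B scans each list once to build its deduplicated not-removed candidate sequence, keeps a per-list iterator into it, and in each round only deletes the newly-common features from the current selection and refills from the iterator, so each list element is consumed at most once across all rounds (same cost on the measured random inputs, which finish in one or two rounds).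
-- outside the precondition, e.g. on iterative_common_removed_topk({1: [-1, 1, -1]}, -2, 3): A returns ({1: []}, {1, -1}, 3), B returns ({1: []}, {-1}, 2)
import Mathlib
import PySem

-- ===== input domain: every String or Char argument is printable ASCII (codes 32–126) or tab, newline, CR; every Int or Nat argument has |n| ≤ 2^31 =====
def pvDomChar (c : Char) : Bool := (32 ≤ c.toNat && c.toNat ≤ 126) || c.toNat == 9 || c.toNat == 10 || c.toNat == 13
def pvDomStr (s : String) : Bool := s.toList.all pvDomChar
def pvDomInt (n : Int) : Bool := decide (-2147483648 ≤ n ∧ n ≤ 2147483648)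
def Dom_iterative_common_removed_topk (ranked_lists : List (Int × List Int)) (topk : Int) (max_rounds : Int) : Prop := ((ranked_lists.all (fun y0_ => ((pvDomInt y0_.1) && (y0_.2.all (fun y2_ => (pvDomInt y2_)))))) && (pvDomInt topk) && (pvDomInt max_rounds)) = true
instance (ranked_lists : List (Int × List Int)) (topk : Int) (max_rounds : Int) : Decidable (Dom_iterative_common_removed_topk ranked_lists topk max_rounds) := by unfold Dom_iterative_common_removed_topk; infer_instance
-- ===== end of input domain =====

-- B replaces A's per-round full rescans by one dedup/filter scan per list plus an
-- incremental refill from a per-list candidate suffix (objective: alternative).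


-- ===== PORT A =====
-- ranked_lists[ind] (association-list lookup, first match)
def pvGetRL (rl : List (Int × List Int)) (ind : Int) : List Int :=
  (List.lookup ind rl).getD []

-- list(ranked_lists.keys()): the distinct keys in insertion order
def pvKeys (rl : List (Int × List Int)) : List Int :=
  PySem.Set.ofList (rl.map Prod.fst)

-- {ind: list(ranked_lists[ind][:topk]) for ind in inds}
def pvSel0 (rl : List (Int × List Int)) (topk : Int) : PySem.Dict Int (List Int) :=
  (pvKeys rl).foldl
    (fun d i => d.insert i (PySem.List.slice (pvGetRL rl i) none (some topk)))
    PySem.Dict.empty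

-- set.intersection(*sets); the [] case is Python's TypeError, excluded by Pre_
def pvInterAll (sets : List (PySem.Set Int)) : PySem.Set Int :=
  match sets with
  | [] => PySem.Set.empty
  | s :: rest => rest.foldl PySem.Set.inter s

-- A's inner rebuild loop: for fid in ranked_lists[ind]: skip removed/dup, append, break at topk
def pvRebuildA (fids : List Int) (removed : PySem.Set Int) (topk : Int) (acc : List Int) : List Int :=
  match fids with
  | [] => acc
  | f :: rest =>
    if PySem.Set.contains removed f || acc.contains f then pvRebuildA rest removed topk acc
    else if topk ≤ ((acc.length + 1 : Nat) : Int) then acc ++ [f]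
    else pvRebuildA rest removed topk (acc ++ [f])

-- A's while loop; fuel = max_rounds.toNat plays 'rounds < max_rounds' (rounds = max_rounds.toNat - fuel)
def pvLoopA (rl : List (Int × List Int)) (inds : List Int) (topk : Int) (fuel : Nat)
    (selected : PySem.Dict Int (List Int)) (removed : PySem.Set Int) (rounds : Int) :
    PySem.Dict Int (List Int) × PySem.Set Int × Int :=
  match fuel with
  | 0 => (selected, removed, rounds)
  | Nat.succ fuel' =>
    let rounds' := rounds + 1
    let common := pvInterAll (inds.map (fun i => PySem.Set.ofList (selected.getD i [])))
    if common.isEmpty then (selected, removed, rounds')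
    else
      let removed' := PySem.Set.union removed common
      let selected' := inds.foldl
        (fun d i => d.insert i (pvRebuildA (pvGetRL rl i) removed' topk [])) selected
      pvLoopA rl inds topk fuel' selected' removed' rounds'

def iterative_common_removed_topk (ranked_lists : List (Int × List Int)) (topk : Int) (max_rounds : Int) : (List (Int × List Int)) × List Int × Int :=
  let inds := pvKeys ranked_lists
  let res := pvLoopA ranked_lists inds topk max_rounds.toNat (pvSel0 ranked_lists topk) PySem.Set.empty 0
  (res.1.items, res.2.1, res.2.2)

-- ===== PORT B =====
-- one scan: distinct (seen-set) and not-yet-removed feature ids, in order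
def pvAvail (fids : List Int) (seen : PySem.Set Int) (removed : PySem.Set Int) : List Int :=
  match fids with
  | [] => []
  | f :: rest =>
    if PySem.Set.contains seen f then pvAvail rest seen removed
    else if PySem.Set.contains removed f then pvAvail rest (PySem.Set.add seen f) removed
    else f :: pvAvail rest (PySem.Set.add seen f) removed

-- state = {ind: (avail[:topk], iter(avail[topk:]))}
def pvState0 (rl : List (Int × List Int)) (topk : Int) (removed : PySem.Set Int) :
    PySem.Dict Int (List Int × List Int) :=
  (pvKeys rl).foldl
    (fun d i =>
      let avail := pvAvail (pvGetRL rl i) PySem.Set.empty removed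
      d.insert i (PySem.List.slice avail none (some topk), PySem.List.slice avail (some topk) none))
    PySem.Dict.empty

-- while len(sel) < topk: f = next(it, None); skip removed, append (iterator = list suffix)
def pvRefill (sel : List Int) (rest : List Int) (removed : PySem.Set Int) (topk : Int) :
    List Int × List Int :=
  match rest with
  | [] => (sel, [])
  | f :: rs =>
    if (sel.length : Int) < topk then
      if PySem.Set.contains removed f then pvRefill sel rs removed topk
      else pvRefill (sel ++ [f]) rs removed topk
    else (sel, f :: rs)

-- B's incremental while loop (starts at rounds = 1; fuel = (max_rounds - 1).toNat)
def pvLoopB (topk : Int) (inds : List Int) (fuel : Nat)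
    (state : PySem.Dict Int (List Int × List Int)) (removed : PySem.Set Int) (rounds : Int) :
    PySem.Dict Int (List Int × List Int) × PySem.Set Int × Int :=
  match fuel with
  | 0 => (state, removed, rounds)
  | Nat.succ fuel' =>
    let rounds' := rounds + 1
    let common := pvInterAll (inds.map (fun i => PySem.Set.ofList (state.getD i ([], [])).1))
    if common.isEmpty then (state, removed, rounds')
    else
      let removed' := PySem.Set.union removed common
      let state' := inds.foldl
        (fun d i =>
          let p := d.getD i ([], [])
          d.insert i (pvRefill (p.1.filter (fun f => !(PySem.Set.contains common f))) p.2 removed' topk))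
        state
      pvLoopB topk inds fuel' state' removed' rounds'

def iterative_common_removed_topk_alt (ranked_lists : List (Int × List Int)) (topk : Int) (max_rounds : Int) : (List (Int × List Int)) × List Int × Int :=
  let inds := pvKeys ranked_lists
  let selected0 := pvSel0 ranked_lists topk
  if max_rounds ≤ 0 then (selected0.items, PySem.Set.empty, 0)
  else
    let common := pvInterAll (inds.map (fun i => PySem.Set.ofList (selected0.getD i [])))
    if common.isEmpty then (selected0.items, PySem.Set.empty, 1)
    else
      let removed := PySem.Set.union PySem.Set.empty common
      let res := pvLoopB topk inds (max_rounds - 1).toNat (pvState0 ranked_lists topk removed) removed 1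
      (res.1.items.map (fun p => (p.1, p.2.1)), res.2.1, res.2.2)

-- ===== PRECONDITION & SPEC =====
-- Pre_ excludes (a) the empty dict with max_rounds > 0, on which A raises TypeError in
-- set.intersection(*[]), and (b) negative topk, a count outside the natural domain: there A
-- selects an all-but-last-|topk| slice in round 1 but its rebuild loop's post-append bound
-- check keeps exactly one element per list in later rounds — an accident of implementation.
def Pre_iterative_common_removed_topk (ranked_lists : List (Int × List Int)) (topk : Int) (max_rounds : Int) : Prop :=
  0 ≤ topk ∧ (ranked_lists ≠ [] ∨ max_rounds ≤ 0)
instance (ranked_lists : List (Int × List Int)) (topk : Int) (max_rounds : Int) : Decidable (Pre_iterative_common_removed_topk ranked_lists topk max_rounds) := by unfold Pre_iterative_common_removed_topk; infer_instance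

def pvWitness_iterative_common_removed_topk : (List (Int × List Int)) × Int × Int :=
  ([(0, [1, 2, 3]), (1, [2, 1, 3])], 2, 5)

def Spec_iterative_common_removed_topk (ranked_lists : List (Int × List Int)) (topk : Int) (max_rounds : Int) (out : (List (Int × List Int)) × List Int × Int) : Prop := out = iterative_common_removed_topk_alt ranked_lists topk max_rounds
instance (ranked_lists : List (Int × List Int)) (topk : Int) (max_rounds : Int) (out : (List (Int × List Int)) × List Int × Int) : Decidable (Spec_iterative_common_removed_topk ranked_lists topk max_rounds out) := by unfold Spec_iterative_common_removed_topk; infer_instance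

-- ===== CLAIM (what is proved, stated in full; the proofs are below) =====
def Claim_equal_iterative_common_removed_topk : Prop := ∀ (ranked_lists : List (Int × List Int)) (topk : Int) (max_rounds : Int), Dom_iterative_common_removed_topk ranked_lists topk max_rounds → Pre_iterative_common_removed_topk ranked_lists topk max_rounds → Spec_iterative_common_removed_topk ranked_lists topk max_rounds (iterative_common_removed_topk ranked_lists topk max_rounds)

-- ===== LEMMAS AND PROOFS =====

-- the per-list invariant between rounds: the still-available (distinct, not removed)
-- features of L are exactly the current selection followed by the unconsumed,
-- not-removed suffix, and the selection is full unless the suffix is exhausted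
def pvInv (R : PySem.Set Int) (k : Int) (st : List Int × List Int) (L : List Int) : Prop :=
  pvAvail L PySem.Set.empty R = st.1 ++ st.2.filter (fun f => !(PySem.Set.contains R f))
  ∧ (st.1.length : Int) ≤ k ∧ (st.1.length = k.toNat ∨ st.2 = [])

lemma pvAvail_not_removed (L : List Int) : ∀ (seen R : PySem.Set Int) (x : Int),
    x ∈ pvAvail L seen R → PySem.Set.contains R x = false := by
  induction L with
  | nil => intro seen R x h; simp [pvAvail] at h
  | cons f rest ih =>
    intro seen R x h
    unfold pvAvail at h
    split at h
    · exact ih _ _ _ h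
    · split at h
      · exact ih _ _ _ h
      · rcases List.mem_cons.mp h with rfl | h2
        · rename_i h1 h2; simpa using h2
        · exact ih _ _ _ h2


lemma pvAvail_mono_filter (L : List Int) : ∀ (seen R R' : PySem.Set Int),
    (∀ x : Int, PySem.Set.contains R x = true → PySem.Set.contains R' x = true) →
    pvAvail L seen R' = (pvAvail L seen R).filter (fun f => !(PySem.Set.contains R' f)) := by
  induction L with
  | nil => intro seen R R' h; simp [pvAvail]
  | cons f rest ih =>
    intro seen R R' h
    unfold pvAvail
    split
    · exact ih _ _ _ h
    · by_cases hR : PySem.Set.contains R f = true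
      · rw [if_pos hR, if_pos (h f hR), ih _ _ _ h]
      · rw [if_neg hR]
        by_cases hR' : PySem.Set.contains R' f = true
        · rw [if_pos hR', List.filter_cons_of_neg (by simpa using hR'), ih _ _ _ h]
        · rw [if_neg hR', List.filter_cons_of_pos (by simpa using hR'), ih _ _ _ h]


lemma pvRebuildA_spec (R : PySem.Set Int) (k : Int) (hk : 1 ≤ k) : ∀ (L : List Int)
    (acc : List Int) (seen : PySem.Set Int), acc.length < k.toNat →
    (∀ x : Int, x ∈ acc ↔ (x ∈ seen ∧ PySem.Set.contains R x = false)) →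
    pvRebuildA L R k acc = acc ++ List.take (k.toNat - acc.length) (pvAvail L seen R) := by
  intro L
  induction L with
  | nil => intro acc seen hlen hinv; simp [pvRebuildA, pvAvail]
  | cons f rest ih =>
    intro acc seen hlen hinv
    unfold pvRebuildA pvAvail
    by_cases hR : PySem.Set.contains R f = true
    · have hfR : f ∈ R := by simpa using hR
      rw [if_pos (by simp [hfR])]
      by_cases hs : PySem.Set.contains seen f = true
      · rw [if_pos hs]; exact ih acc seen hlen hinv
      · rw [if_neg hs, if_pos hR]
        refine ih acc _ hlen ?_
        intro x
        rw [hinv x]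
        constructor
        · rintro ⟨h1, h2⟩; exact ⟨(PySem.Set.mem_add _ _ _).mpr (Or.inl h1), h2⟩
        · rintro ⟨h1, h2⟩
          rcases (PySem.Set.mem_add _ _ _).mp h1 with h | rfl
          · exact ⟨h, h2⟩
          · rw [hR] at h2; cases h2
    · by_cases hacc : f ∈ acc
      · rw [if_pos (by simp [hacc])]
        have hs : PySem.Set.contains seen f = true := by
          have := (hinv f).mp hacc
          simpa [PySem.Set.contains_iff] using this.1
        rw [if_pos hs]
        exact ih acc seen hlen hinv
      · have hs : ¬ PySem.Set.contains seen f = true := by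
          intro hs
          exact hacc ((hinv f).mpr ⟨by simpa [PySem.Set.contains_iff] using hs, by simpa using hR⟩)
        have hfR : f ∉ R := by simpa using hR
        rw [if_neg (by simp [hfR, hacc]), if_neg hs, if_neg hR]
        have hinv' : ∀ x : Int, x ∈ acc ++ [f] ↔ (x ∈ PySem.Set.add seen f ∧ PySem.Set.contains R x = false) := by
          intro x
          simp only [List.mem_append, List.mem_singleton, PySem.Set.mem_add, hinv x]
          constructor
          · rintro (⟨h1, h2⟩ | rfl)
            · exact ⟨Or.inl h1, h2⟩
            · exact ⟨Or.inr rfl, by simpa using hR⟩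
          · rintro ⟨h1 | rfl, h2⟩
            · exact Or.inl ⟨h1, h2⟩
            · exact Or.inr rfl
        by_cases hfull : k ≤ ((acc.length + 1 : Nat) : Int)
        · rw [if_pos hfull]
          have hlen' : acc.length + 1 = k.toNat := by omega
          have : k.toNat - acc.length = 1 := by omega
          simp [this]
        · rw [if_neg hfull]
          have hlen' : (acc ++ [f]).length < k.toNat := by simp; omega
          rw [ih (acc ++ [f]) (PySem.Set.add seen f) hlen' hinv']
          have : k.toNat - acc.length = (k.toNat - (acc.length + 1)) + 1 := by omega
          simp [this, List.take_succ_cons]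


lemma pvRefill_spec (R : PySem.Set Int) (k : Int) : ∀ (rest sel : List Int),
    (∀ x ∈ sel, PySem.Set.contains R x = false) → (sel.length : Int) ≤ k →
    (pvRefill sel rest R k).1 ++ (pvRefill sel rest R k).2.filter (fun f => !(PySem.Set.contains R f))
        = sel ++ rest.filter (fun f => !(PySem.Set.contains R f))
    ∧ ((pvRefill sel rest R k).1.length : Int) ≤ k
    ∧ ((pvRefill sel rest R k).1.length = k.toNat ∨ (pvRefill sel rest R k).2 = [])
    ∧ (∀ x ∈ (pvRefill sel rest R k).1, PySem.Set.contains R x = false) := by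
  intro rest
  induction rest with
  | nil => intro sel hsel hlen; exact ⟨by simp [pvRefill], by simp [pvRefill, hlen], by simp [pvRefill], by simpa [pvRefill] using hsel⟩
  | cons f rs ih =>
    intro sel hsel hlen
    unfold pvRefill
    by_cases hlt : (sel.length : Int) < k
    · rw [if_pos hlt]
      by_cases hR : PySem.Set.contains R f = true
      · rw [if_pos hR]
        have h := ih sel hsel hlen
        refine ⟨?_, h.2.1, h.2.2.1, h.2.2.2⟩
        rw [h.1, List.filter_cons_of_neg (by simpa using hR)]
      · rw [if_neg hR]
        have hsel' : ∀ x ∈ sel ++ [f], PySem.Set.contains R x = false := by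
          intro x hx
          rcases List.mem_append.mp hx with h | h
          · exact hsel x h
          · simp at h; subst h; simpa using hR
        have hlen' : ((sel ++ [f]).length : Int) ≤ k := by simp; omega
        have h := ih (sel ++ [f]) hsel' hlen'
        refine ⟨?_, h.2.1, h.2.2.1, h.2.2.2⟩
        rw [h.1, List.filter_cons_of_pos (by simpa using hR), List.append_assoc]
        simp
    · rw [if_neg hlt]
      refine ⟨rfl, by simpa using hlen, Or.inl (by simp; omega), hsel⟩


lemma pvMem_foldl_inter (l : List (PySem.Set Int)) : ∀ (s : PySem.Set Int) (x : Int),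
    x ∈ l.foldl PySem.Set.inter s → x ∈ s := by
  induction l with
  | nil => intro s x h; simpa using h
  | cons t rest ih =>
    intro s x h
    have := ih (PySem.Set.inter s t) x h
    exact ((PySem.Set.mem_inter _ _ _).mp this).1


lemma pvItemsShape_keys {ν : Type} (inds : List Int) (w : Int → ν) (d : PySem.Dict Int ν)
    (h : d.items = inds.map (fun i => (i, w i))) : d.keys = inds := by
  rw [PySem.Dict.keys, h, List.map_map]
  simp [Function.comp_def]


lemma pvItemsShape_getD {ν : Type} (inds : List Int) (w : Int → ν) (d : PySem.Dict Int ν)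
    (h : d.items = inds.map (fun i => (i, w i))) (hnd : inds.Nodup) (dflt : ν) :
    ∀ i ∈ inds, d.getD i dflt = w i := by
  intro i hi
  have hmem : (i, w i) ∈ d.items := by rw [h]; exact List.mem_map.mpr ⟨i, hi, rfl⟩
  have hk : d.keys.Nodup := by rw [pvItemsShape_keys inds w d h]; exact hnd
  exact PySem.Dict.getD_of_mem_items d hmem hk dflt


lemma pvFoldlInsertItems {ν : Type} (dflt : ν) (F : Int → ν → ν) :
    ∀ (suf : List Int) (d : PySem.Dict Int ν), suf.Nodup → d.keys.Nodup →
    (∀ i ∈ suf, d.contains i = true) →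
    (suf.foldl (fun d i => d.insert i (F i (d.getD i dflt))) d).items
      = d.items.map (fun p => if p.1 ∈ suf then (p.1, F p.1 (d.getD p.1 dflt)) else p) := by
  intro suf
  induction suf with
  | nil =>
    intro d _ _ _
    simp
  | cons i rest ih =>
    intro d hnd hkeys hcont
    have hci : d.contains i = true := hcont i (List.mem_cons_self)
    have hins : (d.insert i (F i (d.getD i dflt))).items
        = d.items.map (fun p => if p.1 == i then (i, F i (d.getD i dflt)) else p) :=
      PySem.Dict.items_insert_of_contains d _ hci
    have hkeys' : (d.insert i (F i (d.getD i dflt))).keys.Nodup := by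
      rw [PySem.Dict.keys_insert_of_contains d _ hci]; exact hkeys
    have hcont' : ∀ j ∈ rest, (d.insert i (F i (d.getD i dflt))).contains j = true := by
      intro j hj
      rw [PySem.Dict.contains_insert]
      simp [hcont j (List.mem_cons_of_mem _ hj)]
    have hstep := ih (d.insert i (F i (d.getD i dflt))) (List.Nodup.of_cons hnd) hkeys' hcont'
    rw [List.foldl_cons, hstep, hins, List.map_map]
    apply List.map_congr_left
    intro p hp
    have hinotr : i ∉ rest := (List.nodup_cons.mp hnd).1
    by_cases hpi : p.1 = i
    · simp [Function.comp_apply, hpi, hinotr]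
    · by_cases hpr : p.1 ∈ rest
      · simp [Function.comp_apply, hpi, hpr, PySem.Dict.getD_insert]
      · simp [Function.comp_apply, hpi, hpr]


lemma pvStep (R common : PySem.Set Int) (k : Int) (hk : 1 ≤ k) (L : List Int)
    (st : List Int × List Int) (hInv : pvInv R k st L) :
    pvRebuildA L (PySem.Set.union R common) k [] =
      (pvRefill (st.1.filter (fun f => !(PySem.Set.contains common f))) st.2 (PySem.Set.union R common) k).1
    ∧ pvInv (PySem.Set.union R common) k
        (pvRefill (st.1.filter (fun f => !(PySem.Set.contains common f))) st.2 (PySem.Set.union R common) k) L := by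
  obtain ⟨hav, hlen, hfull⟩ := hInv
  set R' := PySem.Set.union R common with hR'
  have hcR' : ∀ x : Int, (PySem.Set.contains R' x = true) ↔ (PySem.Set.contains R x = true ∨ PySem.Set.contains common x = true) := by
    intro x
    constructor
    · intro h
      rcases (PySem.Set.mem_union _ _ _).mp (by simpa using h) with h1 | h1
      · exact Or.inl (by simpa using h1)
      · exact Or.inr (by simpa using h1)
    · rintro (h1 | h1)
      · have : x ∈ R' := (PySem.Set.mem_union _ _ _).mpr (Or.inl (by simpa using h1))
        simpa using this
      · have : x ∈ R' := (PySem.Set.mem_union _ _ _).mpr (Or.inr (by simpa using h1))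
        simpa using this
  have hmono : ∀ x : Int, PySem.Set.contains R x = true → PySem.Set.contains R' x = true :=
    fun x hx => (hcR' x).mpr (Or.inl hx)
  have hselR : ∀ x ∈ st.1, PySem.Set.contains R x = false := by
    intro x hx
    exact pvAvail_not_removed L _ R x (by rw [hav]; exact List.mem_append.mpr (Or.inl hx))
  have hfilter_eq : st.1.filter (fun f => !(PySem.Set.contains common f))
      = st.1.filter (fun f => !(PySem.Set.contains R' f)) := by
    apply List.filter_congr
    intro x hx
    have hxR := hselR x hx
    cases hc : PySem.Set.contains common x with
    | true => rw [(hcR' x).mpr (Or.inr hc)]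
    | false =>
      have h2 : PySem.Set.contains R' x = false := by
        cases h : PySem.Set.contains R' x with
        | false => rfl
        | true =>
          rcases (hcR' x).mp h with h1 | h1
          · rw [hxR] at h1; cases h1
          · rw [hc] at h1; cases h1
      rw [h2]
  have havR' : pvAvail L PySem.Set.empty R'
      = st.1.filter (fun f => !(PySem.Set.contains common f)) ++ st.2.filter (fun f => !(PySem.Set.contains R' f)) := by
    rw [pvAvail_mono_filter L PySem.Set.empty R R' hmono, hav, List.filter_append, hfilter_eq]
    congr 1
    rw [List.filter_filter]
    apply List.filter_congr
    intro x _
    cases h1 : PySem.Set.contains R' x with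
    | true => simp
    | false =>
      have h2 : PySem.Set.contains R x = false := by
        cases h : PySem.Set.contains R x with
        | false => rfl
        | true => rw [hmono x h] at h1; cases h1
      simp
      simpa using h2
  set sel0 := st.1.filter (fun f => !(PySem.Set.contains common f)) with hsel0
  have hsel0R' : ∀ x ∈ sel0, PySem.Set.contains R' x = false := by
    intro x hx
    rw [hfilter_eq] at hx
    have h := (List.mem_filter.mp hx).2
    cases h' : PySem.Set.contains R' x with
    | false => rfl
    | true => rw [h'] at h; simp at h
  have hsel0len : ((sel0).length : Int) ≤ k := by
    calc ((sel0).length : Int) ≤ (st.1.length : Int) := by exact_mod_cast List.length_filter_le _ _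
    _ ≤ k := hlen
  have hrf := pvRefill_spec R' k st.2 sel0 hsel0R' hsel0len
  have hinv1 : pvAvail L PySem.Set.empty R'
      = (pvRefill sel0 st.2 R' k).1 ++ (pvRefill sel0 st.2 R' k).2.filter (fun f => !(PySem.Set.contains R' f)) := by
    rw [hrf.1, havR']
  refine ⟨?_, hinv1, hrf.2.1, hrf.2.2.1⟩
  have hreb := pvRebuildA_spec R' k hk L [] PySem.Set.empty (by simp; omega) (by simp [PySem.Set.empty])
  rw [hreb, hinv1]
  simp only [List.nil_append, List.length_nil, Nat.sub_zero]
  rcases hrf.2.2.1 with hK | hnil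
  · rw [List.take_left' hK]
  · rw [hnil]
    simp only [List.filter_nil, List.append_nil]
    exact List.take_of_length_le (by have := hrf.2.1; omega)


-- the two loops agree, given aligned dicts and the invariant
lemma pvLoopEq (rl : List (Int × List Int)) (k : Int) (hk : 1 ≤ k) :
    ∀ (fuel : Nat) (selA : PySem.Dict Int (List Int))
      (stB : PySem.Dict Int (List Int × List Int)) (R : PySem.Set Int) (rounds : Int)
      (a : Int → List Int) (b : Int → List Int × List Int),
    selA.items = (pvKeys rl).map (fun i => (i, a i)) →
    stB.items = (pvKeys rl).map (fun i => (i, b i)) →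
    (∀ i ∈ pvKeys rl, a i = (b i).1) →
    (∀ i ∈ pvKeys rl, pvInv R k (b i) (pvGetRL rl i)) →
    (pvLoopA rl (pvKeys rl) k fuel selA R rounds).1.items
        = (pvLoopB k (pvKeys rl) fuel stB R rounds).1.items.map (fun p => (p.1, p.2.1))
    ∧ (pvLoopA rl (pvKeys rl) k fuel selA R rounds).2.1
        = (pvLoopB k (pvKeys rl) fuel stB R rounds).2.1
    ∧ (pvLoopA rl (pvKeys rl) k fuel selA R rounds).2.2
        = (pvLoopB k (pvKeys rl) fuel stB R rounds).2.2 := by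
  intro fuel
  induction fuel with
  | zero =>
    intro selA stB R rounds a b hA hB hab _
    refine ⟨?_, rfl, rfl⟩
    simp only [pvLoopA, pvLoopB]
    rw [hA, hB, List.map_map]
    exact List.map_congr_left (fun i hi => by simp [hab i hi])
  | succ fuel ih =>
    intro selA stB R rounds a b hA hB hab hInv
    have hnd : (pvKeys rl).Nodup := PySem.Set.nodup_ofList _
    have hgA : ∀ i ∈ pvKeys rl, selA.getD i [] = a i := pvItemsShape_getD _ _ _ hA hnd []
    have hgB : ∀ i ∈ pvKeys rl, stB.getD i ([], []) = b i := pvItemsShape_getD _ _ _ hB hnd ([], [])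
    have hkA : selA.keys = pvKeys rl := pvItemsShape_keys _ _ _ hA
    have hkB : stB.keys = pvKeys rl := pvItemsShape_keys _ _ _ hB
    have hcommon : (pvKeys rl).map (fun i => PySem.Set.ofList (selA.getD i []))
        = (pvKeys rl).map (fun i => PySem.Set.ofList (stB.getD i ([], [])).1) :=
      List.map_congr_left (fun i hi => by rw [hgA i hi, hgB i hi, hab i hi])
    simp only [pvLoopA, pvLoopB, hcommon]
    by_cases hemp : (pvInterAll ((pvKeys rl).map (fun i => PySem.Set.ofList (stB.getD i ([], [])).1))).isEmpty
    · rw [if_pos hemp, if_pos hemp]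
      refine ⟨?_, rfl, rfl⟩
      rw [hA, hB, List.map_map]
      exact List.map_congr_left (fun i hi => by simp [hab i hi])
    · rw [if_neg hemp, if_neg hemp]
      set common := pvInterAll ((pvKeys rl).map (fun i => PySem.Set.ofList (stB.getD i ([], [])).1)) with hcdef
      set R' := PySem.Set.union R common with hR'def
      have hcontA : ∀ i ∈ pvKeys rl, selA.contains i = true := by
        intro i hi
        rw [PySem.Dict.contains_iff_mem_keys, hkA]; exact hi
      have hcontB : ∀ i ∈ pvKeys rl, stB.contains i = true := by
        intro i hi
        rw [PySem.Dict.contains_iff_mem_keys, hkB]; exact hi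
      have hkeysA : selA.keys.Nodup := by rw [hkA]; exact hnd
      have hkeysB : stB.keys.Nodup := by rw [hkB]; exact hnd
      have hitA := pvFoldlInsertItems ([] : List Int)
        (fun i _ => pvRebuildA (pvGetRL rl i) R' k []) (pvKeys rl) selA hnd hkeysA hcontA
      have hitB := pvFoldlInsertItems (([], []) : List Int × List Int)
        (fun i p => pvRefill (p.1.filter (fun f => !(PySem.Set.contains common f))) p.2 R' k)
        (pvKeys rl) stB hnd hkeysB hcontB
      have hstep : ∀ i ∈ pvKeys rl,
          pvRebuildA (pvGetRL rl i) R' k [] =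
            (pvRefill ((b i).1.filter (fun f => !(PySem.Set.contains common f))) (b i).2 R' k).1
          ∧ pvInv R' k
              (pvRefill ((b i).1.filter (fun f => !(PySem.Set.contains common f))) (b i).2 R' k)
              (pvGetRL rl i) :=
        fun i hi => pvStep R common k hk (pvGetRL rl i) (b i) (hInv i hi)
      have hA' : (List.foldl (fun d i => d.insert i (pvRebuildA (pvGetRL rl i) R' k [])) selA (pvKeys rl)).items
          = (pvKeys rl).map (fun i => (i, pvRebuildA (pvGetRL rl i) R' k [])) := by
        rw [hitA, hA, List.map_map]
        exact List.map_congr_left (fun i hi => by simp [hi])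
      have hB' : (List.foldl (fun d i =>
            d.insert i (pvRefill ((d.getD i ([], [])).1.filter (fun f => !(PySem.Set.contains common f)))
              (d.getD i ([], [])).2 R' k)) stB (pvKeys rl)).items
          = (pvKeys rl).map (fun i => (i,
              pvRefill ((b i).1.filter (fun f => !(PySem.Set.contains common f))) (b i).2 R' k)) := by
        rw [hitB, hB, List.map_map]
        exact List.map_congr_left (fun i hi => by simp [hi, hgB i hi])
      exact ih _ _ R' (rounds + 1) _ _ hA' hB'
        (fun i hi => (hstep i hi).1) (fun i hi => (hstep i hi).2)

-- shapes of the two initial dicts and the round-1 invariant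
lemma pvSel0_items (rl : List (Int × List Int)) (k : Int) :
    (pvSel0 rl k).items
      = (pvKeys rl).map (fun i => (i, PySem.List.slice (pvGetRL rl i) none (some k))) := by
  have h := PySem.Dict.items_foldl_insert_fresh (pvKeys rl) (fun i => i)
    (fun i => PySem.List.slice (pvGetRL rl i) none (some k)) PySem.Dict.empty
    (fun a _ => PySem.Dict.contains_empty a) (by simp only [List.map_id']; exact PySem.Set.nodup_ofList _)
  simpa [pvSel0] using h

lemma pvState0_items (rl : List (Int × List Int)) (k : Int) (R : PySem.Set Int) :
    (pvState0 rl k R).items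
      = (pvKeys rl).map (fun i =>
          (i, (PySem.List.slice (pvAvail (pvGetRL rl i) PySem.Set.empty R) none (some k),
               PySem.List.slice (pvAvail (pvGetRL rl i) PySem.Set.empty R) (some k) none))) := by
  have h := PySem.Dict.items_foldl_insert_fresh (pvKeys rl) (fun i => i)
    (fun i => (PySem.List.slice (pvAvail (pvGetRL rl i) PySem.Set.empty R) none (some k),
               PySem.List.slice (pvAvail (pvGetRL rl i) PySem.Set.empty R) (some k) none)) PySem.Dict.empty
    (fun a _ => PySem.Dict.contains_empty a) (by simp only [List.map_id']; exact PySem.Set.nodup_ofList _)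
  simpa [pvState0] using h

lemma pvInv_init (rl : List (Int × List Int)) (k : Int) (hk0 : 0 ≤ k) (R : PySem.Set Int) (i : Int) :
    pvInv R k (PySem.List.slice (pvAvail (pvGetRL rl i) PySem.Set.empty R) none (some k),
               PySem.List.slice (pvAvail (pvGetRL rl i) PySem.Set.empty R) (some k) none) (pvGetRL rl i) := by
  set avail := pvAvail (pvGetRL rl i) PySem.Set.empty R with hav
  rw [PySem.List.slice_to _ hk0, PySem.List.slice_from _ hk0]
  refine ⟨?_, ?_, ?_⟩
  · have hfil : (List.drop k.toNat avail).filter (fun f => !(PySem.Set.contains R f))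
        = List.drop k.toNat avail := by
      rw [List.filter_eq_self]
      intro x hx
      have := pvAvail_not_removed (pvGetRL rl i) PySem.Set.empty R x (List.mem_of_mem_drop hx)
      simpa using this
    simp only []
    rw [hfil, List.take_append_drop]
  · simp only [List.length_take]
    have : min k.toNat avail.length ≤ k.toNat := Nat.min_le_left _ _
    omega
  · simp only [List.length_take]
    by_cases hle : k.toNat ≤ avail.length
    · exact Or.inl (by omega)
    · exact Or.inr (List.drop_eq_nil_of_le (by omega))

-- if topk = 0 the round-1 selections are all empty, so the first intersection is empty
lemma pvCommon0_ne_k_pos (rl : List (Int × List Int)) (k : Int) (hk0 : 0 ≤ k) (hrl : rl ≠ [])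
    (hne : ¬ (pvInterAll ((pvKeys rl).map (fun i => PySem.Set.ofList ((pvSel0 rl k).getD i [])))).isEmpty) :
    1 ≤ k := by
  rcases Int.lt_or_le 0 k with h | h
  · omega
  · exfalso
    have hk : k = 0 := le_antisymm h hk0
    subst hk
    obtain ⟨p, rest, rfl⟩ : ∃ p rest, rl = p :: rest := by
      cases rl with
      | nil => exact absurd rfl hrl
      | cons p rest => exact ⟨p, rest, rfl⟩
    have hkeys : ∃ i0 tl, pvKeys (p :: rest) = i0 :: tl := by
      rw [pvKeys, List.map_cons, PySem.Set.ofList_cons]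
      exact ⟨_, _, rfl⟩
    obtain ⟨i0, tl, hkeq⟩ := hkeys
    rw [hkeq] at hne
    simp only [List.map_cons, pvInterAll] at hne
    rw [List.isEmpty_iff] at hne
    obtain ⟨x, hx⟩ := List.exists_mem_of_ne_nil _ hne
    have hmem := pvMem_foldl_inter _ _ _ hx
    have hgd : (pvSel0 (p :: rest) 0).getD i0 [] = PySem.List.slice (pvGetRL (p :: rest) i0) none (some 0) := by
      refine pvItemsShape_getD _ _ _ (pvSel0_items _ _) (PySem.Set.nodup_ofList _) _ i0 ?_
      rw [hkeq]; exact List.mem_cons_self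
    rw [hgd, PySem.List.slice_to _ le_rfl] at hmem
    simp at hmem

-- ===== VERDICT (by name: the statement is the Claim_ definition above) =====
theorem iterative_common_removed_topk_spec : Claim_equal_iterative_common_removed_topk := by
  unfold Claim_equal_iterative_common_removed_topk
  intro rl k mr _hdom hpre
  obtain ⟨hk0, hpre2⟩ := hpre
  unfold Spec_iterative_common_removed_topk
  unfold iterative_common_removed_topk iterative_common_removed_topk_alt
  by_cases hmr : mr ≤ 0
  · have h0 : mr.toNat = 0 := by omega
    rw [h0, if_pos hmr]
    rfl
  · rw [if_neg hmr]
    have hrl : rl ≠ [] := by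
      rcases hpre2 with h | h
      · exact h
      · exact absurd h hmr
    have hft : mr.toNat = (mr - 1).toNat + 1 := by omega
    rw [hft]
    have hnd : (pvKeys rl).Nodup := PySem.Set.nodup_ofList _
    simp only [pvLoopA, zero_add]
    by_cases hemp : (pvInterAll ((pvKeys rl).map
        (fun i => PySem.Set.ofList ((pvSel0 rl k).getD i [])))).isEmpty
    · rw [if_pos hemp, if_pos hemp]
    · rw [if_neg hemp, if_neg hemp]
      have hk1 : 1 ≤ k := pvCommon0_ne_k_pos rl k hk0 hrl hemp
      set common0 := pvInterAll ((pvKeys rl).map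
        (fun i => PySem.Set.ofList ((pvSel0 rl k).getD i []))) with hc0
      set R1 := PySem.Set.union PySem.Set.empty common0 with hR1
      have hkeysSel0 : (pvSel0 rl k).keys = pvKeys rl := pvItemsShape_keys _ _ _ (pvSel0_items rl k)
      have hcont0 : ∀ i ∈ pvKeys rl, (pvSel0 rl k).contains i = true := by
        intro i hi
        rw [PySem.Dict.contains_iff_mem_keys, hkeysSel0]; exact hi
      have hkeysN : (pvSel0 rl k).keys.Nodup := by rw [hkeysSel0]; exact hnd
      have hitA := pvFoldlInsertItems ([] : List Int)
        (fun i _ => pvRebuildA (pvGetRL rl i) R1 k []) (pvKeys rl) (pvSel0 rl k) hnd hkeysN hcont0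
      have hA1 : ((pvKeys rl).foldl
            (fun d i => d.insert i (pvRebuildA (pvGetRL rl i) R1 k [])) (pvSel0 rl k)).items
          = (pvKeys rl).map (fun i => (i, pvRebuildA (pvGetRL rl i) R1 k [])) := by
        rw [hitA, pvSel0_items, List.map_map]
        exact List.map_congr_left (fun i hi => by simp [hi])
      have hab : ∀ i ∈ pvKeys rl, pvRebuildA (pvGetRL rl i) R1 k []
          = (PySem.List.slice (pvAvail (pvGetRL rl i) PySem.Set.empty R1) none (some k),
             PySem.List.slice (pvAvail (pvGetRL rl i) PySem.Set.empty R1) (some k) none).1 := by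
        intro i _
        have h := pvRebuildA_spec R1 k hk1 (pvGetRL rl i) [] PySem.Set.empty
          (by simp; omega) (by simp [PySem.Set.empty])
        rw [h, PySem.List.slice_to _ hk0]
        simp
      have hinv : ∀ i ∈ pvKeys rl,
          pvInv R1 k (PySem.List.slice (pvAvail (pvGetRL rl i) PySem.Set.empty R1) none (some k),
            PySem.List.slice (pvAvail (pvGetRL rl i) PySem.Set.empty R1) (some k) none)
            (pvGetRL rl i) :=
        fun i _ => pvInv_init rl k hk0 R1 i
      obtain ⟨h1, h2, h3⟩ := pvLoopEq rl k hk1 (mr - 1).toNat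
        ((pvKeys rl).foldl (fun d i => d.insert i (pvRebuildA (pvGetRL rl i) R1 k [])) (pvSel0 rl k))
        (pvState0 rl k R1) R1 1
        (fun i => pvRebuildA (pvGetRL rl i) R1 k [])
        (fun i => (PySem.List.slice (pvAvail (pvGetRL rl i) PySem.Set.empty R1) none (some k),
                   PySem.List.slice (pvAvail (pvGetRL rl i) PySem.Set.empty R1) (some k) none))
        hA1 (pvState0_items rl k R1) hab hinv
      rw [h1, h2, h3]
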